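-- pv_equiv track=rewrite | github.com/chldppwls12/StudyTocoteAllsolve | BOJ/2960_에라토스테네스의_체/chldppwls12.py | solution
-- ===== SOURCE A (Python) =====
-- def solution(n, k):
--   cnt = 0
--   nums = [True] * (n+1)
--   for i in range(2, n+1):
--     for j in range(i, n+1, i):
--       if nums[j] == True:
--         nums[j] = False
--         cnt += 1
--         if cnt == k:
--           return j
-- ===== SOURCE B (Python) =====
-- def solution(n, k):
--     # smallest prime factor by trial division (m >= 2): 2 for even m, else odd divisors only
--     def spf(m):
--         if m % 2 == 0:
--             return 2
--         d = 3
--         while d * d <= m: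
--             if m % d == 0:
--                 return d
--             d += 2
--         return m
--     # the sieve erases each m during the pass of its smallest prime factor, scanning
--     # multiples upward, so the full erasure order is the numbers grouped by spf:
--     order = [m for p in range(2, n + 1) for m in range(p, n + 1, p) if spf(m) == p]
--     if 1 <= k <= len(order):
--         return order[k - 1]
--     return None
-- ===== Notes on version B (the rewrite author's own statement) =====
-- stated objective: alternative
-- what changed: Replaces the mutable boolean sieve with erase-counting and early return by a pure computation: each number's smallest prime factor is found by trial division, the whole erasure order is built as one comprehension grouping numbers under their smallest prime factor, and the answer is an index into that list behind an explicit bounds guard.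
import Mathlib
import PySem

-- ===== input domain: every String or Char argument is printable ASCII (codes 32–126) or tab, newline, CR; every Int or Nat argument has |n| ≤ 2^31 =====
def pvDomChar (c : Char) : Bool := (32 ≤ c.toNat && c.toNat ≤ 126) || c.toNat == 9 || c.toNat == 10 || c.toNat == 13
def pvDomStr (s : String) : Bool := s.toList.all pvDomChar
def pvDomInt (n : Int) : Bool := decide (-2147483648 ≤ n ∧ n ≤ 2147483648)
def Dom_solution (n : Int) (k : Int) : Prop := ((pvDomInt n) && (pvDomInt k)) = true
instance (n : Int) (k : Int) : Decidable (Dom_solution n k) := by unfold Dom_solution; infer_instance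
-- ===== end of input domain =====

-- B replaces A's mutable boolean sieve (erase-and-count with early return) by a pure computation:
-- per-number smallest prime factor by trial division, the erasure order built as one grouped
-- comprehension, and a guarded index into it; alternative algorithm, not claimed faster.

-- ===== PORT A =====
-- inner loop: 'for j in range(i, n+1, i): …' with state (nums, cnt); .inr j = early 'return j'
def pvInnerA (n k : Int) : List Int → List Bool → Int → (List Bool × Int) ⊕ Int
  | [], nums, cnt => .inl (nums, cnt)
  | j :: js, nums, cnt =>
    if PySem.List.pyGetD nums j false = true then
      let nums' := PySem.List.pySetD nums j false
      let cnt' := cnt + 1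
      if cnt' = k then .inr j else pvInnerA n k js nums' cnt'
    else pvInnerA n k js nums cnt

-- outer loop: 'for i in range(2, n+1): …'
def pvOuterA (n k : Int) : List Int → List Bool → Int → (List Bool × Int) ⊕ Int
  | [], nums, cnt => .inl (nums, cnt)
  | i :: is, nums, cnt =>
    match pvInnerA n k (PySem.List.pyRange i (n + 1) i) nums cnt with
    | .inr j => .inr j
    | .inl (nums', cnt') => pvOuterA n k is nums' cnt'

def solution (n : Int) (k : Int) : Option Int :=
  match pvOuterA n k (PySem.List.pyRange 2 (n + 1) 1) (List.replicate (n + 1).toNat true) 0 with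
  | .inr j => some j
  | .inl _ => none

-- ===== PORT B =====
-- 'd = 3; while d * d <= m: if m % d == 0: return d; d += 2; return m'
def pvSpfLoop (m d : Int) : Int :=
  if d * d ≤ m then
    if PySem.Int.mod m d = 0 then d
    else pvSpfLoop m (d + 2)
  else m
termination_by (m - d).toNat
decreasing_by
  rename_i h1 h2
  have hdvd : ¬ (d ∣ m) := by
    intro hd; exact h2 ((PySem.Int.mod_eq_zero_iff_dvd m d).mpr hd)
  have hm0 : m ≠ 0 := by rintro rfl; exact hdvd (dvd_zero d)
  have hd1 : d ≠ 1 := by rintro rfl; exact hdvd (one_dvd m)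
  have hsq : 0 ≤ d * d := mul_self_nonneg d
  have hmpos : 1 ≤ m := by omega
  have hlt : d < m := by
    by_cases hd0 : d ≤ 0
    · omega
    · have hd2 : 2 ≤ d := by omega
      have h2d : 0 ≤ d * (d - 2) := mul_nonneg (by omega) (by omega)
      have : d * d = d * (d - 2) + 2 * d := by ring
      omega
  omega

-- 'if m % 2 == 0: return 2' then the odd-divisor loop from 3
def pvSpf (m : Int) : Int := if PySem.Int.mod m 2 = 0 then 2 else pvSpfLoop m 3

def solution_alt (n : Int) (k : Int) : Option Int :=
  let order := (PySem.List.pyRange 2 (n + 1) 1).flatMap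
    (fun p => (PySem.List.pyRange p (n + 1) p).filter (fun m => decide (pvSpf m = p)))
  if 1 ≤ k ∧ k ≤ (order.length : Int) then PySem.List.pyGet? order (k - 1) else none

-- ===== PRECONDITION & SPEC =====
def Spec_solution (n : Int) (k : Int) (out : Option Int) : Prop := out = solution_alt n k
instance (n : Int) (k : Int) (out : Option Int) : Decidable (Spec_solution n k out) := by unfold Spec_solution; infer_instance

-- ===== CLAIM (what is proved, stated in full; the proofs are below) =====
def Claim_equal_solution : Prop := ∀ (n : Int) (k : Int), Dom_solution n k → Spec_solution n k (solution n k)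

-- ===== LEMMAS AND PROOFS =====

-- the prime that erases j in the sieve: smallest prime factor
def pvF (j : Int) : Int := (Nat.minFac j.toNat : Int)

-- the numbers erased during outer pass i, in order
def pvGroup (n i : Int) : List Int :=
  (PySem.List.pyRange i (n + 1) i).filter (fun j => decide (pvF j = i))

-- the full erasure sequence
def pvE (n : Int) : List Int := (PySem.List.pyRange 2 (n + 1) 1).flatMap (pvGroup n)

-- elements still marked among js
def pvHits (nums : List Bool) (js : List Int) : List Int :=
  js.filter (fun j => PySem.List.pyGetD nums j false)

-- invariant on nums before outer pass c
def pvNumsInv (n c : Int) (nums : List Bool) : Prop :=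
  nums.length = (n + 1).toNat ∧
  ∀ j : Int, 0 ≤ j → j ≤ n →
    PySem.List.pyGetD nums j false = decide (j < 2 ∨ c ≤ pvF j)

-- ---- basic facts about pvF ----
lemma pvF_two_le {j : Int} (h : 2 ≤ j) : 2 ≤ pvF j := by
  have h1 : j.toNat ≠ 1 := by omega
  have := (Nat.minFac_prime h1).two_le
  unfold pvF; exact_mod_cast this

lemma pvF_dvd {j : Int} (h : 2 ≤ j) : pvF j ∣ j := by
  have hj : ((j.toNat : Int)) = j := by omega
  have := Nat.minFac_dvd j.toNat
  unfold pvF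
  rw [← hj]
  exact_mod_cast this

lemma pvF_le_self {j : Int} (h : 2 ≤ j) : pvF j ≤ j := by
  have := Nat.minFac_le (n := j.toNat) (by omega)
  unfold pvF; omega

lemma pvF_le_of_dvd {d j : Int} (hd : 2 ≤ d) (hdvd : d ∣ j) (hj : 2 ≤ j) : pvF j ≤ d := by
  have hdn : d.toNat ∣ j.toNat := by
    have hd' : ((d.toNat : Int)) = d := by omega
    have hj' : ((j.toNat : Int)) = j := by omega
    rw [← Int.natCast_dvd_natCast, hd', hj']; exact hdvd
  have := Nat.minFac_le_of_dvd (by omega) hdn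
  unfold pvF; omega

-- ---- spf loop correctness ----
lemma pvSpfLoop_eq (t : Nat) : ∀ m d : Int, (m - d).toNat ≤ t → 2 ≤ m → 3 ≤ d →
    d % 2 = 1 → ¬ (2:Int) ∣ m →
    (∀ e : Int, 2 ≤ e → e < d → ¬ e ∣ m) → pvSpfLoop m d = pvF m := by
  induction t with
  | zero =>
    intro m d ht hm hd hodd hm2 hnd
    rw [pvSpfLoop]
    split_ifs with h1 h2
    · -- m % d == 0: the answer is d
      have hdvd : d ∣ m := (PySem.Int.mod_eq_zero_iff_dvd m d).mp h2
      have hle : pvF m ≤ d := pvF_le_of_dvd (by omega) hdvd hm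
      have hnlt : ¬ pvF m < d := fun hlt => hnd _ (pvF_two_le hm) hlt (pvF_dvd hm)
      omega
    · -- impossible: d*d ≤ m forces d < m, contradicting the fuel bound
      exfalso
      have h2d : 0 ≤ d * (d - 2) := mul_nonneg (by omega) (by omega)
      have : d * d = d * (d - 2) + 2 * d := by ring
      omega
    · -- no divisor up to √m: m is its own smallest prime factor
      by_cases hp : Nat.Prime m.toNat
      · unfold pvF; rw [hp.minFac_eq]; omega
      · exfalso
        have hsq := Nat.minFac_sq_le_self (n := m.toNat) (by omega) hp
        have hsq' : pvF m * pvF m ≤ m := by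
          unfold pvF
          have : (m.toNat.minFac * m.toNat.minFac : Nat) ≤ m.toNat := by
            simpa [pow_two] using hsq
          omega
        have h2F := pvF_two_le hm
        have hFd : pvF m < d := by nlinarith
        exact hnd _ h2F hFd (pvF_dvd hm)
  | succ t ih =>
    intro m d ht hm hd hodd hm2 hnd
    rw [pvSpfLoop]
    split_ifs with h1 h2
    · have hdvd : d ∣ m := (PySem.Int.mod_eq_zero_iff_dvd m d).mp h2
      have hle : pvF m ≤ d := pvF_le_of_dvd (by omega) hdvd hm
      have hnlt : ¬ pvF m < d := fun hlt => hnd _ (pvF_two_le hm) hlt (pvF_dvd hm)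
      omega
    · have h2d : 0 ≤ d * (d - 2) := mul_nonneg (by omega) (by omega)
      have hdd : d * d = d * (d - 2) + 2 * d := by ring
      refine ih m (d + 2) (by omega) hm (by omega) (by omega) hm2 ?_
      intro e he2 helt hedvd
      rcases lt_trichotomy e d with h | h | h
      · exact hnd e he2 h hedvd
      · subst h; exact h2 ((PySem.Int.mod_eq_zero_iff_dvd m e).mpr hedvd)
      · -- e = d + 1 is even, but m is odd
        have he : e = d + 1 := by omega
        have h2e : (2:Int) ∣ e := by omega
        exact hm2 (dvd_trans h2e hedvd)
    · by_cases hp : Nat.Prime m.toNat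
      · unfold pvF; rw [hp.minFac_eq]; omega
      · exfalso
        have hsq := Nat.minFac_sq_le_self (n := m.toNat) (by omega) hp
        have hsq' : pvF m * pvF m ≤ m := by
          unfold pvF
          have : (m.toNat.minFac * m.toNat.minFac : Nat) ≤ m.toNat := by
            simpa [pow_two] using hsq
          omega
        have h2F := pvF_two_le hm
        have hFd : pvF m < d := by nlinarith
        exact hnd _ h2F hFd (pvF_dvd hm)

lemma pvSpf_eq {m : Int} (h : 2 ≤ m) : pvSpf m = pvF m := by
  unfold pvSpf
  by_cases h2 : PySem.Int.mod m 2 = 0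
  · rw [if_pos h2]
    have hdvd : (2:Int) ∣ m := (PySem.Int.mod_eq_zero_iff_dvd m 2).mp h2
    have hle : pvF m ≤ 2 := pvF_le_of_dvd (le_refl 2) hdvd h
    have h2F := pvF_two_le h
    omega
  · rw [if_neg h2]
    have hm2 : ¬ (2:Int) ∣ m := fun hdvd => h2 ((PySem.Int.mod_eq_zero_iff_dvd m 2).mpr hdvd)
    refine pvSpfLoop_eq (m - 3).toNat m 3 (by omega) h (by omega) (by omega) hm2 ?_
    intro e he2 hel
    have : e = 2 := by omega
    subst this
    exact hm2

-- ---- pyRange with positive step ----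
lemma pairwise_lt_pyRange_pos {a b s : Int} (hs : 0 < s) :
    (PySem.List.pyRange a b s).Pairwise (· < ·) := by
  rw [PySem.List.pyRange_of_pos a b hs]
  rw [List.pairwise_map]
  refine List.pairwise_lt_range.imp ?_
  intro x y h
  have hxy : (x : Int) < (y : Int) := by exact_mod_cast h
  linarith [mul_lt_mul_of_pos_left hxy hs]

lemma nodup_pyRange_pos {a b s : Int} (hs : 0 < s) :
    (PySem.List.pyRange a b s).Nodup := by
  exact (pairwise_lt_pyRange_pos hs).imp (fun h => ne_of_lt h)

-- ---- pySetD/pyGetD on nonnegative indices ----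
lemma pyGetD_pySetD_int (xs : List Bool) (i j : Int) (v d : Bool)
    (hi0 : 0 ≤ i) (hilen : i < (xs.length : Int)) (hj0 : 0 ≤ j) :
    PySem.List.pyGetD (PySem.List.pySetD xs i v) j d = if j = i then v else PySem.List.pyGetD xs j d := by
  have hi' : ((i.toNat : Nat) : Int) = i := by omega
  by_cases hjlen : j < (xs.length : Int)
  · have hj' : ((j.toNat : Nat) : Int) = j := by omega
    rw [← hi', ← hj',
      PySem.List.pyGetD_pySetD_natCast xs i.toNat j.toNat v d (by omega)]
    by_cases h : j = i
    · rw [if_pos (by omega), if_pos (by rw [hi', hj']; exact h)]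
    · rw [if_neg (by omega), if_neg (by rw [hi', hj']; exact h)]
  · have hne : j ≠ i := by omega
    rw [if_neg hne, PySem.List.pyGetD_of_nonneg _ _ hj0, PySem.List.pyGetD_of_nonneg _ _ hj0,
      List.getD_eq_default, List.getD_eq_default]
    · omega
    · rw [PySem.List.length_pySetD]; omega

lemma pyGetD_cons_of_pos {α : Type} (a : α) (l : List α) (i : Int) (d : α) (h : 1 ≤ i) :
    PySem.List.pyGetD (a :: l) i d = PySem.List.pyGetD l (i - 1) d := by
  rw [PySem.List.pyGetD_of_nonneg _ _ (by omega : (0:Int) ≤ i),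
    PySem.List.pyGetD_of_nonneg _ _ (by omega : (0:Int) ≤ i - 1)]
  have hi : i.toNat = (i - 1).toNat + 1 := by omega
  rw [hi, List.getD_cons_succ]

-- ---- inner loop ----
lemma inner_run (n k : Int) : ∀ (js : List Int) (nums : List Bool) (cnt : Int),
    js.Nodup → (∀ j ∈ js, 0 ≤ j ∧ j < (nums.length : Int)) →
    ((cnt < k ∧ k ≤ cnt + ((pvHits nums js).length : Int) →
        pvInnerA n k js nums cnt = .inr (PySem.List.pyGetD (pvHits nums js) (k - 1 - cnt) 0)) ∧
     (¬ (cnt < k ∧ k ≤ cnt + ((pvHits nums js).length : Int)) →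
        ∃ nums', pvInnerA n k js nums cnt = .inl (nums', cnt + ((pvHits nums js).length : Int)) ∧
          nums'.length = nums.length ∧
          ∀ j' : Int, 0 ≤ j' →
            PySem.List.pyGetD nums' j' false =
              (PySem.List.pyGetD nums j' false && !(js.contains j')))) := by
  intro js
  induction js with
  | nil =>
    intro nums cnt _ _
    constructor
    · intro h; exfalso; simp [pvHits] at h; omega
    · intro _
      exact ⟨nums, by simp [pvInnerA, pvHits], rfl, by simp⟩
  | cons j js ih =>
    intro nums cnt hnd hbnd
    have hjmem : 0 ≤ j ∧ j < (nums.length : Int) := hbnd j (List.mem_cons_self)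
    have hndtail : js.Nodup := (List.nodup_cons.mp hnd).2
    have hjnotin : j ∉ js := (List.nodup_cons.mp hnd).1
    have hbndtail : ∀ x ∈ js, 0 ≤ x ∧ x < (nums.length : Int) :=
      fun x hx => hbnd x (List.mem_cons_of_mem _ hx)
    by_cases hj : PySem.List.pyGetD nums j false = true
    · have hhits : pvHits nums (j :: js) = j :: pvHits nums js := by
        simp [pvHits, hj]
      have hlen' : (PySem.List.pySetD nums j false).length = nums.length :=
        PySem.List.length_pySetD nums j false
      have hget' : ∀ x : Int, 0 ≤ x →
          PySem.List.pyGetD (PySem.List.pySetD nums j false) x false =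
            if x = j then false else PySem.List.pyGetD nums x false :=
        fun x hx => pyGetD_pySetD_int nums j x false false hjmem.1 hjmem.2 hx
      have hhits' : pvHits (PySem.List.pySetD nums j false) js = pvHits nums js := by
        unfold pvHits
        apply List.filter_congr
        intro x hx
        have hxj : x ≠ j := by intro he; subst he; exact hjnotin hx
        rw [hget' x (hbndtail x hx).1, if_neg hxj]
      by_cases hk : cnt + 1 = k
      · constructor
        · intro _
          simp only [pvInnerA, hj, if_true, if_pos hk, hhits]
          have h0 : k - 1 - cnt = 0 := by omega
          rw [h0, PySem.List.pyGetD_zero_cons]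
        · intro hncond
          exfalso
          rw [hhits] at hncond
          simp only [List.length_cons] at hncond
          push_cast at hncond
          omega
      · have hbnd' : ∀ x ∈ js, 0 ≤ x ∧ x < ((PySem.List.pySetD nums j false).length : Int) := by
          intro x hx; rw [hlen']; exact hbndtail x hx
        have IH := ih (PySem.List.pySetD nums j false) (cnt + 1) hndtail hbnd'
        rw [hhits'] at IH
        constructor
        · intro hcond
          rw [hhits] at hcond ⊢
          simp only [List.length_cons] at hcond
          push_cast at hcond
          have hcond' : cnt + 1 < k ∧ k ≤ (cnt + 1) + ((pvHits nums js).length : Int) := by omega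
          have hres := IH.1 hcond'
          simp only [pvInnerA, hj, if_true, if_neg hk]
          rw [pyGetD_cons_of_pos _ _ _ _ (by omega : 1 ≤ k - 1 - cnt),
            show (k - 1 - cnt - 1 : Int) = k - 1 - (cnt + 1) by omega]
          exact hres
        · intro hncond
          rw [hhits] at hncond
          simp only [List.length_cons] at hncond
          push_cast at hncond
          have hncond' : ¬ (cnt + 1 < k ∧ k ≤ (cnt + 1) + ((pvHits nums js).length : Int)) := by omega
          obtain ⟨nums'', hrun, hlen'', hchar''⟩ := IH.2 hncond'
          refine ⟨nums'', ?_, by rw [hlen'', hlen'], ?_⟩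
          · simp only [pvInnerA, hj, if_true, if_neg hk]
            rw [hrun, hhits]
            simp only [List.length_cons, Sum.inl.injEq, Prod.mk.injEq]
            refine ⟨trivial, by push_cast; ring⟩
          · intro j' hj'
            rw [hchar'' j' hj', hget' j' hj']
            by_cases he : j' = j
            · subst he
              simp [hj]
            · simp [he]
    · have hjf : PySem.List.pyGetD nums j false = false := by
        revert hj; cases PySem.List.pyGetD nums j false <;> simp
      have hhits : pvHits nums (j :: js) = pvHits nums js := by
        simp [pvHits, hjf]
      have IH := ih nums cnt hndtail hbndtail
      constructor
      · intro hcond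
        rw [hhits] at hcond ⊢
        have hres := IH.1 hcond
        simp only [pvInnerA, hjf, Bool.false_eq_true, if_false]
        exact hres
      · intro hncond
        rw [hhits] at hncond
        obtain ⟨nums'', hrun, hlen'', hchar''⟩ := IH.2 hncond
        refine ⟨nums'', ?_, hlen'', ?_⟩
        · simp only [pvInnerA, hjf, Bool.false_eq_true, if_false]
          rw [hhits, hrun]
        · intro j' hj'
          rw [hchar'' j' hj']
          by_cases he : j' = j
          · subst he
            simp [hjf]
          · simp [he]

-- ---- hits = group under the invariant ----
lemma hits_eq_group {n i : Int} {nums : List Bool} (hinv : pvNumsInv n i nums) (hi : 2 ≤ i) :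
    pvHits nums (PySem.List.pyRange i (n + 1) i) = pvGroup n i := by
  unfold pvHits pvGroup
  apply List.filter_congr
  intro j hj
  obtain ⟨h1, h2, h3⟩ := (PySem.List.mem_pyRange_iff_of_pos (by omega : (0:Int) < i) j).mp hj
  have hdvd : i ∣ j := by
    obtain ⟨c, hc⟩ := h3
    exact ⟨c + 1, by rw [mul_add, mul_one, ← hc]; ring⟩
  have hFle : pvF j ≤ i := pvF_le_of_dvd hi hdvd (by omega)
  rw [hinv.2 j (by omega) (by omega)]
  simp only [decide_eq_decide]
  omega

lemma inv_step {n i : Int} {nums nums' : List Bool} (hinv : pvNumsInv n i nums) (hi : 2 ≤ i)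
    (hlen : nums'.length = nums.length)
    (hchar : ∀ j' : Int, 0 ≤ j' →
      PySem.List.pyGetD nums' j' false =
        (PySem.List.pyGetD nums j' false && !((PySem.List.pyRange i (n + 1) i).contains j'))) :
    pvNumsInv n (i + 1) nums' := by
  constructor
  · rw [hlen, hinv.1]
  · intro j hj0 hjn
    rw [hchar j hj0, hinv.2 j hj0 hjn]
    have hmem : j ∈ PySem.List.pyRange i (n + 1) i ↔ i ∣ j ∧ i ≤ j := by
      rw [PySem.List.mem_pyRange_iff_of_pos (by omega : (0:Int) < i)]
      constructor
      · rintro ⟨ha, hb, c, hc⟩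
        exact ⟨⟨c + 1, by rw [mul_add, mul_one, ← hc]; ring⟩, ha⟩
      · rintro ⟨⟨c, hc⟩, ha⟩
        exact ⟨ha, by omega, ⟨c - 1, by rw [mul_sub, mul_one, ← hc]⟩⟩
    have hcont : ((PySem.List.pyRange i (n + 1) i).contains j = true) ↔ (i ∣ j ∧ i ≤ j) := by
      rw [List.contains_iff_mem, hmem]
    by_cases hj2 : j < 2
    · have hnotc : ¬ (PySem.List.pyRange i (n + 1) i).contains j = true := by
        rw [hcont]; rintro ⟨_, hle⟩; omega
      simp only [Bool.not_eq_true] at hnotc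
      simp only [hnotc, Bool.not_false, Bool.and_true, decide_eq_decide]
      omega
    · have hF2 : 2 ≤ pvF j := pvF_two_le (by omega)
      have hFds : pvF j ∣ j := pvF_dvd (by omega)
      have hFle : pvF j ≤ j := pvF_le_self (by omega)
      rcases lt_trichotomy (pvF j) i with hc | hc | hc
      · have hL : ¬ (j < 2 ∨ i ≤ pvF j) := by omega
        have hR : ¬ (j < 2 ∨ i + 1 ≤ pvF j) := by omega
        simp only [decide_eq_false hL, decide_eq_false hR, Bool.false_and]
      · have hcj : (PySem.List.pyRange i (n + 1) i).contains j = true := by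
          rw [hcont]; exact ⟨hc ▸ hFds, by omega⟩
        have hR : ¬ (j < 2 ∨ i + 1 ≤ pvF j) := by omega
        simp only [hcj, Bool.not_true, Bool.and_false, decide_eq_false hR]
      · have hnotc : ¬ (PySem.List.pyRange i (n + 1) i).contains j = true := by
          rw [hcont]
          rintro ⟨hd, _⟩
          have := pvF_le_of_dvd hi hd (by omega)
          omega
        simp only [Bool.not_eq_true] at hnotc
        have hL : j < 2 ∨ i ≤ pvF j := by omega
        have hR : j < 2 ∨ i + 1 ≤ pvF j := by omega
        simp only [hnotc, Bool.not_false, Bool.and_true, decide_eq_true hL, decide_eq_true hR]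

lemma pyGetD_append_left {α : Type} (l1 l2 : List α) (i : Int) (d : α)
    (h0 : 0 ≤ i) (h : i < (l1.length : Int)) :
    PySem.List.pyGetD (l1 ++ l2) i d = PySem.List.pyGetD l1 i d := by
  rw [PySem.List.pyGetD_of_nonneg _ _ h0, PySem.List.pyGetD_of_nonneg _ _ h0]
  exact List.getD_append l1 l2 d i.toNat (by omega)

lemma pyGetD_append_right' {α : Type} (l1 l2 : List α) (i : Int) (d : α)
    (h : (l1.length : Int) ≤ i) :
    PySem.List.pyGetD (l1 ++ l2) i d = PySem.List.pyGetD l2 (i - l1.length) d := by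
  rw [PySem.List.pyGetD_of_nonneg _ _ (by omega : (0:Int) ≤ i),
    PySem.List.pyGetD_of_nonneg _ _ (by omega : (0:Int) ≤ i - l1.length)]
  rw [List.getD_append_right l1 l2 d i.toNat (by omega)]
  congr 1
  omega

-- ---- outer loop ----
lemma outer_run (n k : Int) : ∀ t : Nat, ∀ c : Int, ∀ nums : List Bool, ∀ cnt : Int,
    (n + 1 - c).toNat ≤ t → 2 ≤ c → pvNumsInv n c nums →
    ((cnt < k ∧ k ≤ cnt + ((((PySem.List.pyRange c (n + 1) 1).flatMap (pvGroup n)).length : Int)) →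
        pvOuterA n k (PySem.List.pyRange c (n + 1) 1) nums cnt =
          .inr (PySem.List.pyGetD ((PySem.List.pyRange c (n + 1) 1).flatMap (pvGroup n)) (k - 1 - cnt) 0)) ∧
     (¬ (cnt < k ∧ k ≤ cnt + ((((PySem.List.pyRange c (n + 1) 1).flatMap (pvGroup n)).length : Int))) →
        ∃ nums', pvOuterA n k (PySem.List.pyRange c (n + 1) 1) nums cnt =
          .inl (nums', cnt + ((((PySem.List.pyRange c (n + 1) 1).flatMap (pvGroup n)).length : Int))))) := by
  intro t
  induction t with
  | zero =>
    intro c nums cnt ht hc hinv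
    rw [PySem.List.pyRange_one_eq_nil (by omega : n + 1 ≤ c)]
    constructor
    · intro hcond; exfalso; simp only [List.flatMap_nil, List.length_nil] at hcond; omega
    · intro _
      exact ⟨nums, by simp [pvOuterA]⟩
  | succ t ih =>
    intro c nums cnt ht hc hinv
    by_cases hcb : n + 1 ≤ c
    · rw [PySem.List.pyRange_one_eq_nil hcb]
      constructor
      · intro hcond; exfalso; simp only [List.flatMap_nil, List.length_nil] at hcond; omega
      · intro _
        exact ⟨nums, by simp [pvOuterA]⟩
    · rw [not_le] at hcb
      rw [PySem.List.pyRange_one_cons (by omega : c < n + 1)]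
      have hlen : (nums.length : Int) = n + 1 := by rw [hinv.1]; omega
      have hbnd : ∀ j ∈ PySem.List.pyRange c (n + 1) c, 0 ≤ j ∧ j < (nums.length : Int) := by
        intro j hj
        obtain ⟨h1, h2, _⟩ := (PySem.List.mem_pyRange_iff_of_pos (by omega : (0:Int) < c) j).mp hj
        omega
      have hIN := inner_run n k (PySem.List.pyRange c (n + 1) c) nums cnt
        (nodup_pyRange_pos (by omega)) hbnd
      rw [hits_eq_group hinv hc] at hIN
      simp only [List.flatMap_cons]
      by_cases hcnd : cnt < k ∧ k ≤ cnt + ((pvGroup n c).length : Int)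
      · have hres := hIN.1 hcnd
        constructor
        · intro _
          simp only [pvOuterA]
          rw [hres]
          rw [pyGetD_append_left _ _ _ _ (by omega) (by omega)]
        · intro hcond2
          exfalso
          simp only [List.length_append] at hcond2
          push_cast at hcond2
          omega
      · have htt : (n + 1 - (c + 1)).toNat ≤ t := by clear hIN; omega
        have hc1 : (2:Int) ≤ c + 1 := by clear hIN; omega
        obtain ⟨nums', hrun, hlen', hchar⟩ := hIN.2 hcnd
        clear hIN
        have hinv' : pvNumsInv n (c + 1) nums' := inv_step hinv hc hlen' hchar
        have IH := ih (c + 1) nums' (cnt + ((pvGroup n c).length : Int)) htt hc1 hinv'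
        constructor
        · intro hcond2
          simp only [List.length_append] at hcond2
          push_cast at hcond2
          have hcnd2 : cnt + ((pvGroup n c).length : Int) < k ∧
              k ≤ (cnt + ((pvGroup n c).length : Int)) +
                (((PySem.List.pyRange (c + 1) (n + 1) 1).flatMap (pvGroup n)).length : Int) := by
            omega
          simp only [pvOuterA]
          rw [hrun]
          dsimp only
          rw [IH.1 hcnd2, pyGetD_append_right' _ _ _ _ (by omega),
            show (k - 1 - cnt - ((pvGroup n c).length : Int)) =
              k - 1 - (cnt + ((pvGroup n c).length : Int)) from by ring]
        · intro hcond2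
          simp only [List.length_append] at hcond2
          push_cast at hcond2
          have hcnd2 : ¬ (cnt + ((pvGroup n c).length : Int) < k ∧
              k ≤ (cnt + ((pvGroup n c).length : Int)) +
                (((PySem.List.pyRange (c + 1) (n + 1) 1).flatMap (pvGroup n)).length : Int)) := by
            omega
          obtain ⟨nums'', hrun2⟩ := IH.2 hcnd2
          refine ⟨nums'', ?_⟩
          simp only [pvOuterA]
          rw [hrun]
          dsimp only
          rw [hrun2]
          simp only [List.length_append, Sum.inl.injEq, Prod.mk.injEq]
          refine ⟨trivial, by push_cast; ring⟩

-- ---- A's characterisation ----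
lemma solution_eq (n k : Int) :
    solution n k =
      if 1 ≤ k ∧ k ≤ ((pvE n).length : Int) then PySem.List.pyGet? (pvE n) (k - 1) else none := by
  have hinv : pvNumsInv n 2 (List.replicate (n + 1).toNat true) := by
    constructor
    · simp
    · intro j hj0 hjn
      rw [PySem.List.pyGetD_of_nonneg _ _ hj0,
        List.getD_replicate _ (by omega : j.toNat < (n + 1).toNat)]
      have h2F : j < 2 ∨ 2 ≤ pvF j := by
        by_cases h : j < 2
        · exact .inl h
        · exact .inr (pvF_two_le (by omega))
      exact (decide_eq_true (by omega)).symm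
  have H := outer_run n k (n + 1 - 2).toNat 2 (List.replicate (n + 1).toNat true) 0
    (le_refl _) (by omega) hinv
  by_cases hcond : (0:Int) < k ∧
      k ≤ 0 + (((PySem.List.pyRange 2 (n + 1) 1).flatMap (pvGroup n)).length : Int)
  · have hres := H.1 hcond
    unfold solution
    rw [hres]
    dsimp only
    have hlt : k - 1 < ((pvE n).length : Int) := by unfold pvE; omega
    rw [if_pos ⟨by omega, by unfold pvE; omega⟩,
      PySem.List.pyGet?_eq_some_getElem _ (by omega) hlt]
    congr 1
    have h0 : k - 1 - 0 = k - 1 := by ring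
    rw [h0]
    exact PySem.List.pyGetD_eq_getElem _ _ (by omega) hlt
  · obtain ⟨nums', hres⟩ := H.2 hcond
    unfold solution
    rw [hres]
    dsimp only
    rw [if_neg]
    intro hk
    unfold pvE at hk
    omega

-- ---- B's characterisation ----
lemma solution_alt_eq (n k : Int) :
    solution_alt n k =
      if 1 ≤ k ∧ k ≤ ((pvE n).length : Int) then PySem.List.pyGet? (pvE n) (k - 1) else none := by
  have horder : (PySem.List.pyRange 2 (n + 1) 1).flatMap
      (fun p => (PySem.List.pyRange p (n + 1) p).filter (fun m => decide (pvSpf m = p))) = pvE n := by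
    unfold pvE
    rw [List.flatMap, List.flatMap]
    congr 1
    apply List.map_congr_left
    intro p hp
    obtain ⟨hp2, _⟩ := PySem.List.mem_pyRange_one.mp hp
    unfold pvGroup
    apply List.filter_congr
    intro m hm
    obtain ⟨h1, _, _⟩ := (PySem.List.mem_pyRange_iff_of_pos (by omega : (0:Int) < p) m).mp hm
    rw [pvSpf_eq (by omega : (2:Int) ≤ m)]
  unfold solution_alt
  rw [horder]

-- ===== VERDICT (by name: the statement is the Claim_ definition above) =====
theorem solution_spec : Claim_equal_solution := by
  intro n k _
  unfold Spec_solution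
  rw [solution_eq, solution_alt_eq]
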